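-- pv_equiv track=rewrite | github.com/m-yuhas/interview_questions | puzzles.py | shortest_name
-- ===== SOURCE A (Python) =====
-- from typing import List, Tuple, Union
--
-- def shortest_name(names: List[str]) -> Union[str, None]:
--     """Find the shortest name in a list of names that shares at least one
--     character with every other name in the list.  For example in the list:
--     ['add', 'dog', 'tree', 'house', 'gave'], 'gave' is the word that satisfies
--     the above requirement.
--
--     Arguments:
--         names: List[str]
--             List of names to search.
--
--     Returns:
--         Union[str, None]: the shortest name that shares a letter in common with
--             every other name or None if no such name exists.
--     """
--     return_list = []
--     for current_name in names:
--         candidate = True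
--         for compare_name in names:
--             shares_letter = False
--             for letter in current_name.replace(' ', ''):
--                 if letter in compare_name.replace(' ', ''):
--                     shares_letter = True
--                     break
--             if shares_letter == False:
--                 candidate = False
--                 break
--         if candidate != False:
--             return_list.append(current_name)
--     if len(return_list) == 0:
--         return None
--     smallest_name = return_list[0]
--     for name in return_list:
--         if len(name) < len(smallest_name):
--             smallest_name = name
--     return smallest_name
-- ===== SOURCE B (Python) =====
-- def shortest_name(names):
--     """Shortest name sharing a letter (ignoring spaces) with every name in the
--     list, ties broken by original order.  Sort-first, early-return strategy."""
--     def _shares(a, b):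
--         return bool(set(a.replace(' ', '')) & set(b.replace(' ', '')))
--     for name in sorted(names, key=len):
--         if all(_shares(name, other) for other in names):
--             return name
--     return None
-- ===== Notes on version B (the rewrite author's own statement) =====
-- stated objective: faster
-- what changed: Instead of collecting all candidates with nested character scans and then min-scanning them, B stably sorts the names by length, tests each candidate via set intersection of the space-stripped letters, and returns the first candidate found (None if none).
import Mathlib
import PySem

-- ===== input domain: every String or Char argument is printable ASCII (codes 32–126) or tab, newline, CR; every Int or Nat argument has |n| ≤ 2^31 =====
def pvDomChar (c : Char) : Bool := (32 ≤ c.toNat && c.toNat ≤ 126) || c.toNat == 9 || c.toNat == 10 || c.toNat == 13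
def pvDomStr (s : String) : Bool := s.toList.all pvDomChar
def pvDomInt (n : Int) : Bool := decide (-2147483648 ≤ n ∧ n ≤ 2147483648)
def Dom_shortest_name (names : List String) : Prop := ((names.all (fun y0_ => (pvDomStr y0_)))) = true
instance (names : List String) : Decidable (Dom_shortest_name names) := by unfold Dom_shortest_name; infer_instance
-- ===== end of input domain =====

-- B replaces A's collect-all-candidates-then-min-scan (nested per-character scans) with a
-- stable sort by length plus an early-return first-candidate search using set intersection
-- of the space-stripped letters; same return value, measured faster in a timing run.


-- ===== PORT A =====
-- inner two loops of A: 'for letter in cur.replace(' ',''): if letter in cmp.replace(' ',''): …'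
-- ('letter in <str>' with a single character is exactly character membership)
def pvSharesA (cur cmp : String) : Bool :=
  (PySem.Str.replace cur " " "").toList.any
    (fun letter => (PySem.Str.replace cmp " " "").toList.contains letter)

def shortest_name (names : List String) : Option String :=
  let return_list := names.foldl (fun acc cur =>
    if names.all (fun cmp => pvSharesA cur cmp) then acc ++ [cur] else acc) []
  match return_list with
  | [] => none
  | h :: t => some ((h :: t).foldl (fun best n =>
      if PySem.Str.len n < PySem.Str.len best then n else best) h)

-- ===== PORT B =====
-- bool(set(a.replace(' ','')) & set(b.replace(' ','')))
def pvSharesB (a b : String) : Bool :=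
  !(PySem.Set.inter (PySem.Set.ofList (PySem.Str.replace a " " "").toList)
                    (PySem.Set.ofList (PySem.Str.replace b " " "").toList)).isEmpty

def shortest_name_alt (names : List String) : Option String :=
  (PySem.List.sorted names (fun s => PySem.Str.len s) false).find?
    (fun name => names.all (fun other => pvSharesB name other))

-- ===== PRECONDITION & SPEC =====
def Spec_shortest_name (names : List String) (out : Option String) : Prop := out = shortest_name_alt names
instance (names : List String) (out : Option String) : Decidable (Spec_shortest_name names out) := by unfold Spec_shortest_name; infer_instance

-- ===== CLAIM (what is proved, stated in full; the proofs are below) =====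
def Claim_equal_shortest_name : Prop := ∀ (names : List String), Dom_shortest_name names → Spec_shortest_name names (shortest_name names)

-- ===== LEMMAS AND PROOFS =====

-- the two letter-sharing tests coincide
lemma sharesA_eq_sharesB (a b : String) : pvSharesA a b = pvSharesB a b := by
  unfold pvSharesA pvSharesB
  rcases h : PySem.Set.inter (PySem.Set.ofList (PySem.Str.replace a " " "").toList)
      (PySem.Set.ofList (PySem.Str.replace b " " "").toList) with _ | ⟨x, rest⟩
  · simp only [List.isEmpty_nil, Bool.not_true]
    rw [List.any_eq_false]
    intro c hc
    simp only [List.contains_eq_mem, decide_eq_true_eq]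
    intro hcb
    have hmem : c ∈ (PySem.Set.ofList (PySem.Str.replace a " " "").toList).inter
        (PySem.Set.ofList (PySem.Str.replace b " " "").toList) := by
      rw [PySem.Set.mem_inter]
      exact ⟨(PySem.Set.mem_ofList _ _).2 hc, (PySem.Set.mem_ofList _ _).2 hcb⟩
    rw [h] at hmem
    exact absurd hmem (List.not_mem_nil)
  · simp only [List.isEmpty_cons, Bool.not_false]
    rw [List.any_eq_true]
    have hx : x ∈ PySem.Set.inter (PySem.Set.ofList (PySem.Str.replace a " " "").toList)
        (PySem.Set.ofList (PySem.Str.replace b " " "").toList) := by rw [h]; exact List.mem_cons_self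
    rw [PySem.Set.mem_inter] at hx
    exact ⟨x, (PySem.Set.mem_ofList _ _).1 hx.1, by
      simpa [List.contains_eq_mem] using (PySem.Set.mem_ofList _ _).1 hx.2⟩

-- insertBy puts x in front when x goes before every element
lemma insertBy_front {α : Type} (before : α → α → Bool) (x : α) (S : List α)
    (h : ∀ z ∈ S, before x z = true) :
    PySem.List.insertBy before x S = x :: S := by
  cases S with
  | nil => rfl
  | cons y t => simp [PySem.List.insertBy, h y List.mem_cons_self]

-- filter commutes with a stable insert into a key-sorted list
lemma filter_insertBy (p : String → Bool) (key : String → Int) (x : String) :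
    ∀ (S : List String), S.Pairwise (fun a b => key a ≤ key b) →
    (PySem.List.insertBy (fun a b => decide (key a < key b)) x S).filter p
      = if p x then PySem.List.insertBy (fun a b => decide (key a < key b)) x (S.filter p)
        else S.filter p := by
  intro S
  induction S with
  | nil => intro _; by_cases hp : p x <;> simp [PySem.List.insertBy, List.filter, hp]
  | cons y t ih =>
    intro hS
    rw [List.pairwise_cons] at hS
    obtain ⟨hy, ht⟩ := hS
    by_cases hlt : key x < key y
    · simp only [PySem.List.insertBy, decide_eq_true_eq, if_pos hlt]
      by_cases hp : p x
      · rw [List.filter_cons_of_pos hp, if_pos hp]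
        rw [insertBy_front]
        intro z hz
        rcases List.mem_filter.1 hz with ⟨hz', _⟩
        rcases List.mem_cons.1 hz' with rfl | hz''
        · simpa using hlt
        · simp only [decide_eq_true_eq]; exact lt_of_lt_of_le hlt (hy z hz'')
      · rw [List.filter_cons_of_neg hp, if_neg hp]
    · simp only [PySem.List.insertBy, decide_eq_true_eq, if_neg hlt]
      by_cases hpy : p y
      · rw [List.filter_cons_of_pos hpy, List.filter_cons_of_pos hpy, ih ht]
        by_cases hp : p x
        · rw [if_pos hp, if_pos hp]
          simp [PySem.List.insertBy, hlt]
        · rw [if_neg hp, if_neg hp]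
      · rw [List.filter_cons_of_neg hpy, List.filter_cons_of_neg hpy, ih ht]

-- insertBy into a key-sorted list stays key-sorted
lemma insertBy_pairwise (key : String → Int) (x : String) :
    ∀ (S : List String), S.Pairwise (fun a b => key a ≤ key b) →
    (PySem.List.insertBy (fun a b => decide (key a < key b)) x S).Pairwise
      (fun a b => key a ≤ key b) := by
  intro S
  induction S with
  | nil => intro _; simp [PySem.List.insertBy]
  | cons y t ih =>
    intro hS
    rw [List.pairwise_cons] at hS
    obtain ⟨hy, ht⟩ := hS
    by_cases hlt : key x < key y
    · simp only [PySem.List.insertBy, decide_eq_true_eq, if_pos hlt]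
      rw [List.pairwise_cons]
      constructor
      · intro z hz
        rcases List.mem_cons.1 hz with rfl | hz'
        · exact le_of_lt hlt
        · exact le_of_lt (lt_of_lt_of_le hlt (hy z hz'))
      · rw [List.pairwise_cons]; exact ⟨hy, ht⟩
    · simp only [PySem.List.insertBy, decide_eq_true_eq, if_neg hlt]
      rw [List.pairwise_cons]
      constructor
      · intro z hz
        have hmem : z = x ∨ z ∈ t := by
          have := PySem.List.mem_insertBy (before := fun a b => decide (key a < key b)) (x := x) (ys := t) (y := z)
          exact this.1 hz
        rcases hmem with rfl | hz'
        · omega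
        · exact hy z hz'
      · exact ih ht

-- filter commutes with the insertion-sort fold
lemma filter_foldl_insertBy (p : String → Bool) (key : String → Int) :
    ∀ (xs acc : List String), acc.Pairwise (fun a b => key a ≤ key b) →
    (xs.foldl (fun acc x => PySem.List.insertBy (fun a b => decide (key a < key b)) x acc) acc).filter p
      = (xs.filter p).foldl (fun acc x => PySem.List.insertBy (fun a b => decide (key a < key b)) x acc) (acc.filter p) := by
  intro xs
  induction xs with
  | nil => intro acc _; simp
  | cons x t ih =>
    intro acc hacc
    simp only [List.foldl_cons]
    rw [ih _ (insertBy_pairwise key x acc hacc), filter_insertBy p key x acc hacc]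
    by_cases hp : p x
    · rw [if_pos hp, List.filter_cons_of_pos hp, List.foldl_cons]
    · rw [if_neg hp, List.filter_cons_of_neg hp]

lemma sorted_filter (p : String → Bool) (key : String → Int) (xs : List String) :
    (PySem.List.sorted xs key false).filter p = PySem.List.sorted (xs.filter p) key false := by
  rw [PySem.List.sorted_eq_foldl_insertBy, PySem.List.sorted_eq_foldl_insertBy]
  simpa using filter_foldl_insertBy p key xs [] (by simp)

-- head of the sorted list is A's strict-< min scan (first minimum)
lemma head_sorted_eq_minScan (key : String → Int) (h : String) (t : List String) :
    (PySem.List.sorted (h :: t) key false).head?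
      = some (t.foldl (fun best n => if key n < key best then n else best) h) := by
  induction t using List.reverseRecOn with
  | nil => rfl
  | append_singleton t' x ih =>
    rw [show h :: (t' ++ [x]) = (h :: t') ++ [x] from rfl]
    rw [PySem.List.sorted_eq_foldl_insertBy, List.foldl_append, List.foldl_cons, List.foldl_nil]
    rw [← PySem.List.sorted_eq_foldl_insertBy]
    rcases hs : PySem.List.sorted (h :: t') key false with _ | ⟨s, S'⟩
    · exact absurd ((PySem.List.sorted_eq_nil_iff _ _ _).1 hs) (by simp)
    · have hhead : s = t'.foldl (fun best n => if key n < key best then n else best) h := by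
        have := ih; rw [hs] at this; simpa using this
      subst hhead
      rw [List.foldl_append, List.foldl_cons, List.foldl_nil]
      by_cases hlt : key x < key (t'.foldl (fun best n => if key n < key best then n else best) h)
      · simp [PySem.List.insertBy, hlt]
      · simp [PySem.List.insertBy, hlt]

-- ===== VERDICT (by name: the statement is the Claim_ definition above) =====
theorem shortest_name_spec : Claim_equal_shortest_name := by
  unfold Claim_equal_shortest_name
  intro names _
  unfold Spec_shortest_name shortest_name shortest_name_alt
  have hpred : (fun name => names.all (fun other => pvSharesB name other))
      = (fun cur => names.all (fun cmp => pvSharesA cur cmp)) := by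
    funext n; simp [sharesA_eq_sharesB]
  rw [hpred]
  set P : String → Bool := fun cur => names.all (fun cmp => pvSharesA cur cmp) with hP
  rw [← List.head?_filter, sorted_filter P (fun s => PySem.Str.len s) names]
  simp only [PySem.List.foldl_append_if_eq_filter, List.nil_append]
  rcases hf : names.filter P with _ | ⟨h, t⟩
  · rfl
  · rw [head_sorted_eq_minScan (fun s => PySem.Str.len s) h t]
    simp only [List.foldl_cons]
    have : (if PySem.Str.len h < PySem.Str.len h then h else h) = h := by simp
    rw [this]
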